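-- pv_equiv track=rewrite | github.com/Dennis-2004/AOC | AOC/Advent Of Code 2023/day9.py | part2
-- ===== SOURCE A (Python) =====
-- def part2(data):
--     total = 0
--     for x in data:
--         A = 0
--         for i in range(len(x) - 2, -1, -1):
--             A = x[i][0] - A
--         total += A
--     return total
-- ===== SOURCE B (Python) =====
-- def part2(data):
--     def alt(rows):
--         if len(rows) <= 1:
--             return 0
--         return rows[0][0] - alt(rows[1:])
--     return sum(alt(x) for x in data)
-- ===== Notes on version B (the rewrite author's own statement) =====
-- stated objective: simpler
-- what changed: Replaces A's index-driven backward accumulator loop over range(len(x)-2,-1,-1) with a structural recursion alt(rows) = rows[0][0] - alt(rows[1:]) on each row list (no indices), summed over rows with sum().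
import Mathlib
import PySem

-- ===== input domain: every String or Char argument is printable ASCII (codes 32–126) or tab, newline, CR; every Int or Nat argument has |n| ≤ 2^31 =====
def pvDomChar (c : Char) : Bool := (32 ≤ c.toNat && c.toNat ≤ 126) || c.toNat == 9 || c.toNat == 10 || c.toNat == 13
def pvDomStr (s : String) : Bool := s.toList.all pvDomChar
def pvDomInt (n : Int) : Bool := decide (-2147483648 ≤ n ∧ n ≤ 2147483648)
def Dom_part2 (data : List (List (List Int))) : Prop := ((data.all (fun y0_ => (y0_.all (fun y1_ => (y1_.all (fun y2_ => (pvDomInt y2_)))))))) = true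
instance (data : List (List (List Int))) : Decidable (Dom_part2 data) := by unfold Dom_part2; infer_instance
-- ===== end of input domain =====

-- B replaces A's index-driven backward accumulator loop with a structural
-- recursion alt(rows) = rows[0][0] - alt(rows[1:]) per row, summed: simpler, same cost.


-- ===== PORT A =====
-- x[i][0] is ported as pyGetD (pyGetD x i []) 0 0; Pre_part2 guarantees the
-- defaults are never reached on admitted inputs (Python raises there).
def part2 (data : List (List (List Int))) : Int :=
  data.foldl (fun total x =>
    total + (PySem.List.pyRange ((x.length : Int) - 2) (-1) (-1)).foldl
      (fun A i => PySem.List.pyGetD (PySem.List.pyGetD x i []) 0 0 - A) 0) 0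

-- ===== PORT B =====
-- alt(rows): if len(rows) <= 1: 0 else rows[0][0] - alt(rows[1:])
def altRow : List (List Int) → Int
  | [] => 0
  | [_] => 0
  | y :: z :: t => PySem.List.pyGetD y 0 0 - altRow (z :: t)

def part2_alt (data : List (List (List Int))) : Int :=
  (data.map altRow).sum

-- ===== PRECONDITION & SPEC =====
-- Pre_ excludes exactly the inputs where Python A raises IndexError:
-- some row x has an empty inner list among x[0..len(x)-2] (x[i][0] fails).
def Pre_part2 (data : List (List (List Int))) : Prop :=
  ∀ x ∈ data, ∀ y ∈ x.dropLast, y ≠ []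
instance (data : List (List (List Int))) : Decidable (Pre_part2 data) := by
  unfold Pre_part2; infer_instance
def pvWitness_part2 : List (List (List Int)) := [[[1, 2], [3], [5]], [[0]]]
def Spec_part2 (data : List (List (List Int))) (out : Int) : Prop := out = part2_alt data
instance (data : List (List (List Int))) (out : Int) : Decidable (Spec_part2 data out) := by unfold Spec_part2; infer_instance

-- ===== CLAIM =====
def Claim_equal_part2 : Prop := ∀ (data : List (List (List Int))), Dom_part2 data → Pre_part2 data → Spec_part2 data (part2 data)

-- ===== LEMMAS AND PROOFS =====

-- altRow as an ascending foldr over the first len-1 indices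
theorem altRow_eq_foldr (x : List (List Int)) :
    altRow x = (List.range (x.length - 1)).foldr
      (fun (i : Nat) (A : Int) => (x.getD i []).getD 0 0 - A) 0 := by
  induction x with
  | nil => simp [altRow]
  | cons y rest ih =>
    cases rest with
    | nil => simp [altRow]
    | cons z t =>
      have hlen : (y :: z :: t).length - 1 = ((z :: t).length - 1) + 1 := by
        simp [List.length_cons]
      rw [hlen, List.range_succ_eq_map, List.foldr_cons, List.foldr_map]
      simp only [List.getD_cons_zero, List.getD_cons_succ]
      rw [altRow, ← ih, PySem.List.pyGetD_zero]

-- A's inner backward fold equals the same ascending foldr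
theorem rowA_eq_foldr (x : List (List Int)) :
    (PySem.List.pyRange ((x.length : Int) - 2) (-1) (-1)).foldl
      (fun A i => PySem.List.pyGetD (PySem.List.pyGetD x i []) 0 0 - A) 0
    = (List.range (x.length - 1)).foldr
      (fun (i : Nat) (A : Int) => (x.getD i []).getD 0 0 - A) 0 := by
  have hr : PySem.List.pyRange ((x.length : Int) - 2) (-1) (-1)
      = (PySem.List.pyRange 0 ((x.length : Int) - 1) 1).reverse := by
    rw [PySem.List.pyRange_neg_one_eq_reverse]
    have h2 : (x.length : Int) - 2 + 1 = (x.length : Int) - 1 := by ring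
    rw [h2]
    norm_num
  rw [hr, List.foldl_reverse, PySem.List.pyRange_one]
  have hm : (((x.length : Int) - 1) - 0).toNat = x.length - 1 := by omega
  rw [hm, List.foldr_map]
  have hf : (fun (i : Nat) (A : Int) =>
      PySem.List.pyGetD (PySem.List.pyGetD x (0 + (i : Int)) []) 0 0 - A)
      = fun (i : Nat) (A : Int) => (x.getD i []).getD 0 0 - A := by
    funext i A
    simp [PySem.List.pyGetD_zero]
  rw [hf]

-- pulling the accumulator out of a sum-accumulating foldl
theorem foldl_shift (f : List (List Int) → Int) (l : List (List (List Int))) (a : Int) :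
    l.foldl (fun total y => total + f y) a = a + l.foldl (fun total y => total + f y) 0 := by
  induction l generalizing a with
  | nil => simp
  | cons y t iht =>
      simp only [List.foldl_cons]
      rw [iht, iht (0 + f y)]
      ring

-- ===== VERDICT =====
theorem part2_spec : Claim_equal_part2 := by
  intro data hDom hPre
  unfold Spec_part2 part2 part2_alt
  clear hDom hPre
  induction data with
  | nil => rfl
  | cons x t ih =>
      simp only [List.foldl_cons, List.map_cons, List.sum_cons]
      rw [foldl_shift, ih, rowA_eq_foldr, ← altRow_eq_foldr]
      ring
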